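-- pv_equiv track=rewrite | github.com/peteryin21/dnaassembly | assembly.py | find_best_overlap
-- ===== SOURCE A (Python) =====
-- def find_best_overlap(s1, s2):
--     """Take in 2 strings, and return score and offset for best overlap"""
--     if s1 == "" or s2 == "":
--         raise ValueError("Can't find overlap with empty string")
--     min_offset = 1-len(s2)
--     max_offset = len(s1)
--     offset_scores = []
--     for offset in range(min_offset, max_offset):
--         # For each offset, loop through overlap region
--         score = 0
--         mismatch = False
--         for pos in range(max(offset, 0), min(len(s1),len(s2)+offset)):
--             if s1[pos] == s2[pos-offset]:
--                 score += 1
--             else: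
--                 offset_scores.append((-1, offset))
--                 mismatch = True
--                 break
--         if not mismatch:
--             offset_scores.append((score, offset))
--     best = sorted(offset_scores, reverse=True)[0]
--     return best
-- ===== SOURCE B (Python) =====
-- def find_best_overlap(s1, s2):
--     """Take in 2 strings, and return score and offset for best overlap"""
--     if s1 == "" or s2 == "":
--         raise ValueError("Can't find overlap with empty string")
--     n, m = len(s1), len(s2)
--
--     def score(o):
--         lo, hi = max(o, 0), min(n, m + o)
--         return hi - lo if s1[lo:hi] == s2[lo - o:hi - o] else -1
--
--     return max((score(o), o) for o in range(1 - m, n))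
-- ===== Notes on version B (the rewrite author's own statement) =====
-- stated objective: faster
-- what changed: B replaces A's per-offset char-by-char loop with mismatch flag, the accumulated (score,offset) list and the full descending sort by a per-offset slice-equality test and a single max() over a generator.
import Mathlib
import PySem

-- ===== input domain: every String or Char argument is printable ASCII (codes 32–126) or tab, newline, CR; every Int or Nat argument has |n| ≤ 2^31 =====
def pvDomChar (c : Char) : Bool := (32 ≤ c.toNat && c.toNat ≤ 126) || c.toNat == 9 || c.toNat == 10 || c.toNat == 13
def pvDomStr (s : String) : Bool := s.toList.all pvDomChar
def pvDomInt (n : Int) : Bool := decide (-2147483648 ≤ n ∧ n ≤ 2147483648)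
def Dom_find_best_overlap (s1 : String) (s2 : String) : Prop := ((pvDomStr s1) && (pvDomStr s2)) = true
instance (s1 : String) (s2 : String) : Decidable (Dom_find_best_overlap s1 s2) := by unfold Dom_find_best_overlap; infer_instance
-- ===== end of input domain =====

-- B replaces A's char-by-char inner loop, scored list and descending sort by a slice-equality
-- test per offset and a single max(); measurably faster by a large constant factor.


-- ===== PORT A =====
-- inner 'for pos' loop: compares characters, breaks with (-1, offset) on first mismatch,
-- otherwise falls through with (score, offset)
def fboInner (l1 l2 : List Char) (offset : Int) (poss : List Int) (score : Int) : Int × Int :=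
  match poss with
  | [] => (score, offset)
  | p :: rest =>
    if PySem.List.pyGetD l1 p ' ' = PySem.List.pyGetD l2 (p - offset) ' ' then
      fboInner l1 l2 offset rest (score + 1)
    else
      (-1, offset)

def find_best_overlap (s1 : String) (s2 : String) : Int × Int :=
  let l1 := s1.toList
  let l2 := s2.toList
  let n : Int := l1.length
  let m : Int := l2.length
  let offset_scores :=
    (PySem.List.pyRange (1 - m) n 1).foldl
      (fun acc offset =>
        acc ++ [fboInner l1 l2 offset
                  (PySem.List.pyRange (max offset 0) (min n (m + offset)) 1) 0])
      []
  PySem.List.pyGetD (PySem.List.sorted2 offset_scores Prod.fst Prod.snd true) 0 (0, 0)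

-- ===== PORT B =====
-- per-offset score via slice equality (Source B's local 'score')
def fboScore (l1 l2 : List Char) (n m o : Int) : Int :=
  let lo := max o 0
  let hi := min n (m + o)
  if PySem.List.slice l1 (some lo) (some hi) = PySem.List.slice l2 (some (lo - o)) (some (hi - o))
  then hi - lo else -1

def find_best_overlap_alt (s1 : String) (s2 : String) : Int × Int :=
  let l1 := s1.toList
  let l2 := s2.toList
  let n : Int := l1.length
  let m : Int := l2.length
  (PySem.List.max2?
      ((PySem.List.pyRange (1 - m) n 1).map (fun o => (fboScore l1 l2 n m o, o)))
      Prod.fst Prod.snd).getD (0, 0)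

-- ===== PRECONDITION & SPEC =====
-- A raises ValueError when either string is empty; exactly those inputs are excluded.
def Pre_find_best_overlap (s1 : String) (s2 : String) : Prop := s1 ≠ "" ∧ s2 ≠ ""
instance (s1 : String) (s2 : String) : Decidable (Pre_find_best_overlap s1 s2) := by
  unfold Pre_find_best_overlap; infer_instance
def pvWitness_find_best_overlap : String × String := ("AB", "B")

def Spec_find_best_overlap (s1 : String) (s2 : String) (out : Int × Int) : Prop := out = find_best_overlap_alt s1 s2
instance (s1 : String) (s2 : String) (out : Int × Int) : Decidable (Spec_find_best_overlap s1 s2 out) := by unfold Spec_find_best_overlap; infer_instance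

-- ===== CLAIM (what is proved, stated in full; the proofs are below) =====
def Claim_equal_find_best_overlap : Prop := ∀ (s1 : String) (s2 : String), Dom_find_best_overlap s1 s2 → Pre_find_best_overlap s1 s2 → Spec_find_best_overlap s1 s2 (find_best_overlap s1 s2)

-- ===== LEMMAS AND PROOFS =====

-- head of insertBy for the descending tuple order: x goes first iff it strictly beats the old head
theorem head?_insertBy_rev {α κ₁ κ₂ : Type} [LinearOrder κ₁] [LinearOrder κ₂]
    (k1 : α → κ₁) (k2 : α → κ₂) (x : α) (acc : List α) :
    (PySem.List.insertBy
        (fun a b => decide (k1 b < k1 a) || !decide (k1 a < k1 b) && decide (k2 b < k2 a))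
        x acc).head? =
      some (match acc with
            | [] => x
            | h :: _ =>
              if (decide (k1 h < k1 x) || !decide (k1 x < k1 h) && decide (k2 h < k2 x)) = true
              then x else h) := by
  cases acc with
  | nil => simp [PySem.List.insertBy]
  | cons h t =>
    simp only [PySem.List.insertBy]
    split_ifs <;> simp_all

-- the head of the insertion-sort accumulator evolves exactly like max2?'s accumulator
theorem foldl_insertBy_head? {α κ₁ κ₂ : Type} [LinearOrder κ₁] [LinearOrder κ₂]
    (xs : List α) (k1 : α → κ₁) (k2 : α → κ₂) (acc : List α) :
    (xs.foldl (fun a x => PySem.List.insertBy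
        (fun a b => decide (k1 b < k1 a) || !decide (k1 a < k1 b) && decide (k2 b < k2 a)) x a) acc).head?
    = xs.foldl (fun o x => match o with
        | none => some x
        | some m => if (decide (k1 m < k1 x) || !decide (k1 x < k1 m) && decide (k2 m < k2 x)) = true
                    then some x else some m) acc.head? := by
  induction xs generalizing acc with
  | nil => rfl
  | cons y ys ih =>
    simp only [List.foldl_cons]
    rw [ih, head?_insertBy_rev]
    cases acc with
    | nil => simp
    | cons h t => simp; split_ifs <;> rfl

-- head of descending stable tuple sort = Python max (lexicographic, first extremal element)
theorem head?_sorted2_rev {α κ₁ κ₂ : Type} [LinearOrder κ₁] [LinearOrder κ₂]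
    (xs : List α) (k1 : α → κ₁) (k2 : α → κ₂) :
    (PySem.List.sorted2 xs k1 k2 true).head? = PySem.List.max2? xs k1 k2 := by
  simpa [PySem.List.sorted2, PySem.List.max2?] using foldl_insertBy_head? xs k1 k2 []

theorem slice_cons_head {α : Type} (l : List α) (a b : Int)
    (h0 : 0 ≤ a) (hab : a < b) (hb : b ≤ (l.length : Int)) :
    PySem.List.slice l (some a) (some b) =
      l[a.toNat]'(by omega) :: PySem.List.slice l (some (a + 1)) (some b) := by
  rw [PySem.List.slice_toNat _ h0 (by omega), PySem.List.slice_toNat _ (by omega) (by omega)]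
  rw [List.drop_eq_getElem_cons (by omega)]
  have h1 : b.toNat - a.toNat = (b.toNat - (a+1).toNat) + 1 := by omega
  have h2 : (a+1).toNat = a.toNat + 1 := by omega
  rw [h1, h2, List.take_succ_cons]

-- A's inner char-by-char loop over [lo, lo+k) agrees with B's slice-equality test
theorem fboInner_eq_slice (l1 l2 : List Char) (o : Int) (k : Nat) :
    ∀ (lo s : Int), lo + k ≤ (l1.length : Int) → 0 ≤ lo → 0 ≤ lo - o →
    lo - o + k ≤ (l2.length : Int) →
    fboInner l1 l2 o (PySem.List.pyRange lo (lo + k) 1) s =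
      (if PySem.List.slice l1 (some lo) (some (lo + k)) =
          PySem.List.slice l2 (some (lo - o)) (some (lo - o + k))
       then s + k else -1, o) := by
  induction k with
  | zero =>
    intro lo s h1 h2 h3 h4
    rw [PySem.List.pyRange_one_eq_nil (by omega)]
    rw [PySem.List.slice_toNat _ h2 (by omega), PySem.List.slice_toNat _ h3 (by omega)]
    simp [fboInner]
  | succ k ih =>
    intro lo s h1 h2 h3 h4
    rw [PySem.List.pyRange_one_cons (by omega)]
    have e1 := slice_cons_head l1 lo (lo + (k+1:Nat)) h2 (by push_cast; omega) h1
    have e2 := slice_cons_head l2 (lo - o) (lo - o + (k+1:Nat)) h3 (by push_cast; omega) h4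
    simp only [fboInner]
    rw [PySem.List.pyGetD_eq_getElem l1 ' ' h2 (by push_cast at h1 ⊢; omega),
        PySem.List.pyGetD_eq_getElem l2 ' ' h3 (by push_cast at h4 ⊢; omega), e1, e2]
    have harr : lo + 1 + (k:Int) = lo + ((k:Nat)+1 : Nat) := by push_cast; ring
    have harr2 : lo + 1 - o + (k:Int) = lo - o + ((k:Nat)+1 : Nat) := by push_cast; ring
    have harr3 : lo + 1 - o = lo - o + 1 := by ring
    by_cases hc : l1[lo.toNat]'(by push_cast at h1 ⊢; omega) = l2[(lo-o).toNat]'(by push_cast at h4 ⊢; omega)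
    · rw [if_pos hc]
      have := ih (lo + 1) (s + 1) (by push_cast at h1 ⊢; omega) (by omega) (by omega)
        (by push_cast at h4 ⊢; omega)
      rw [harr, harr2, harr3] at this
      rw [this]
      simp only [hc, List.cons_eq_cons, true_and]
      split_ifs <;> push_cast <;> ring_nf
    · rw [if_neg hc]
      rw [if_neg (by simp [hc])]

theorem pyGetD_zero_eq_head?_getD {α : Type} (xs : List α) (d : α) :
    PySem.List.pyGetD xs 0 d = xs.head?.getD d := by
  cases xs <;> simp [PySem.List.pyGetD_zero]

-- each offset contributes the same (score, offset) pair in both ports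
theorem entry_eq (l1 l2 : List Char) (o : Int)
    (ho1 : 1 - (l2.length : Int) ≤ o) (ho2 : o < (l1.length : Int)) :
    fboInner l1 l2 o
        (PySem.List.pyRange (max o 0) (min (l1.length : Int) ((l2.length : Int) + o)) 1) 0 =
      (fboScore l1 l2 (l1.length : Int) (l2.length : Int) o, o) := by
  set n : Int := (l1.length : Int) with hn
  set m : Int := (l2.length : Int) with hm
  have hn0 : 0 ≤ n := by positivity
  have hm0 : 0 ≤ m := by positivity
  set lo : Int := max o 0 with hlo
  set hi : Int := min n (m + o) with hhi
  have hlohi : lo ≤ hi := by omega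
  set k : Nat := (hi - lo).toNat with hk
  have hhik : hi = lo + k := by omega
  have := fboInner_eq_slice l1 l2 o k lo 0 (by omega) (by omega) (by omega) (by omega)
  rw [← hhik] at this
  rw [this]
  simp only [fboScore]
  have : hi - o = lo - o + k := by omega
  rw [← hlo, ← hhi, ← this]
  split_ifs
  · simp only [Prod.mk.injEq, and_true]; omega
  · rfl

-- ===== VERDICT (by name: the statement is the Claim_ definition above) =====
theorem find_best_overlap_spec : Claim_equal_find_best_overlap := by
  intro s1 s2 _ _
  unfold Spec_find_best_overlap find_best_overlap find_best_overlap_alt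
  simp only [PySem.List.foldl_append_singleton_eq_map, List.nil_append]
  rw [List.map_congr_left (fun o ho => by
    rcases PySem.List.mem_pyRange_one.mp ho with ⟨h1, h2⟩
    exact entry_eq s1.toList s2.toList o h1 h2)]
  rw [pyGetD_zero_eq_head?_getD, head?_sorted2_rev]
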